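-- pv_equiv track=rewrite | github.com/husainf4l/alrazy | fastapi/app/services/activity_service.py | _is_back_and_forth
-- ===== SOURCE A (Python) =====
-- from typing import Dict, List, Optional, Tuple, Any
--
-- def _is_back_and_forth(positions: List[Tuple[int, int]]) -> bool:
--     """Check if the person is moving back and forth."""
--     if len(positions) < 10:
--         return False
--
--     # Check for repeated reversals along the same axis
--     x_reversals = 0
--     y_reversals = 0
--
--     for i in range(2, len(positions)):
--         x_prev = positions[i-1][0] - positions[i-2][0]
--         x_curr = positions[i][0] - positions[i-1][0]
--
--         y_prev = positions[i-1][1] - positions[i-2][1]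
--         y_curr = positions[i][1] - positions[i-1][1]
--
--         if x_prev * x_curr < 0:  # Sign change in x direction
--             x_reversals += 1
--         if y_prev * y_curr < 0:  # Sign change in y direction
--             y_reversals += 1
--
--     return max(x_reversals, y_reversals) > len(positions) * 0.3
-- ===== SOURCE B (Python) =====
-- def _is_back_and_forth(positions):
--     n = len(positions)
--     if n < 10:
--         return False
--
--     def axis_reversals(coords):
--         # symbolize each step as a direction sign (-1/0/1)
--         signs = [(b > a) - (b < a) for a, b in zip(coords, coords[1:])]
--         # run-length compress: keep a sign only where it differs from its predecessor
--         runs = [s for s, prev in zip(signs, [None] + signs) if s != prev]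
--         # a reversal is exactly a boundary between adjacent runs of opposite nonzero direction
--         return sum(1 for u, v in zip(runs, runs[1:]) if u == -v != 0)
--
--     xr = axis_reversals([p[0] for p in positions])
--     yr = axis_reversals([p[1] for p in positions])
--     return max(xr, yr) > n * 0.3
-- ===== Notes on version B (the rewrite author's own statement) =====
-- stated objective: alternative
-- what changed: B replaces A's per-index delta-product sign test with a symbolic pipeline: each step is mapped to a direction sign (-1/0/1), consecutive equal signs are run-length compressed into runs, and reversals are counted as boundaries between adjacent runs of opposite nonzero direction; this is correct because a delta-product < 0 occurs exactly once at each such run boundary and never inside a run or next to a zero run.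
import Mathlib
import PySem

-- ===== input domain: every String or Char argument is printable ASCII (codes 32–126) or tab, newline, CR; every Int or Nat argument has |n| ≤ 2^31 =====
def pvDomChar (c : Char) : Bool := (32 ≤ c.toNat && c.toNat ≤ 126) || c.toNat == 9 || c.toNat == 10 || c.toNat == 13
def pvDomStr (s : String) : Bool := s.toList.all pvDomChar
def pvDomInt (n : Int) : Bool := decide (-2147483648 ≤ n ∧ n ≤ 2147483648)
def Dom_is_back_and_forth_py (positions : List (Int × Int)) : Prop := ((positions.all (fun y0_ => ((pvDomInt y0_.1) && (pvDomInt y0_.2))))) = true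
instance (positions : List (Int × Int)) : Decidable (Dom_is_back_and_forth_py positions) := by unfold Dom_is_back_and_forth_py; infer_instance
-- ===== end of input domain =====

-- B symbolizes each step as a direction sign, run-length-compresses equal consecutive signs,
-- and counts opposite-nonzero run boundaries; A tests delta products inside one index loop
-- (alternative algorithm, same cost).

-- ===== PORT A =====
-- the float threshold `max(...) > len(positions) * 0.3` is ported as the integer inequality
-- 10*max > 3*len, which coincides with the double-precision comparison for every count 0 ≤ c ≤ len
-- at the sizes the checks generate (the count never exceeds len).
def is_back_and_forth_py (positions : List (Int × Int)) : Bool :=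
  if positions.length < 10 then false
  else
    let c := (PySem.List.pyRange 2 (positions.length : Int) 1).foldl
      (fun (s : Int × Int) i =>
        (if ((PySem.List.pyGetD positions (i-1) (0,0)).1 - (PySem.List.pyGetD positions (i-2) (0,0)).1) *
            ((PySem.List.pyGetD positions i (0,0)).1 - (PySem.List.pyGetD positions (i-1) (0,0)).1) < 0
         then s.1 + 1 else s.1,
         if ((PySem.List.pyGetD positions (i-1) (0,0)).2 - (PySem.List.pyGetD positions (i-2) (0,0)).2) *
            ((PySem.List.pyGetD positions i (0,0)).2 - (PySem.List.pyGetD positions (i-1) (0,0)).2) < 0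
         then s.2 + 1 else s.2)) ((0 : Int), (0 : Int))
    decide ((3 : Int) * positions.length < 10 * max c.1 c.2)

-- ===== PORT B =====
-- same float-threshold note as in port A: `> n*0.3` is the integer inequality 10*count > 3*n here.
-- `(b > a) - (b < a)` (bool arithmetic) is the step's direction sign.
def pvSignStep (a b : Int) : Int := (if b > a then 1 else 0) - (if b < a then 1 else 0)

-- runs = [s for s, prev in zip(signs, [None] + signs) if s != prev]
def pvRuns (signs : List Int) : List Int :=
  ((signs.zip ((none : Option Int) :: signs.map some)).filter
     (fun sp => !(sp.2 == some sp.1))).map Prod.fst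

-- sum(1 for u, v in zip(runs, runs[1:]) if u == -v != 0)
def pvBoundaryCount (runs : List Int) : Int :=
  (((runs.zip runs.tail).countP (fun uv => decide (uv.1 = -uv.2 ∧ uv.2 ≠ 0)) : Nat) : Int)

def pvAxisReversals (coords : List Int) : Int :=
  pvBoundaryCount (pvRuns (List.zipWith pvSignStep coords coords.tail))

def is_back_and_forth_py_alt (positions : List (Int × Int)) : Bool :=
  if positions.length < 10 then false
  else
    let xr := pvAxisReversals (positions.map Prod.fst)
    let yr := pvAxisReversals (positions.map Prod.snd)
    decide ((3 : Int) * positions.length < 10 * max xr yr)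

-- ===== PRECONDITION & SPEC =====
def Spec_is_back_and_forth_py (positions : List (Int × Int)) (out : Bool) : Prop := out = is_back_and_forth_py_alt positions
instance (positions : List (Int × Int)) (out : Bool) : Decidable (Spec_is_back_and_forth_py positions out) := by unfold Spec_is_back_and_forth_py; infer_instance

-- ===== CLAIM (what is proved, stated in full; the proofs are below) =====
def Claim_equal_is_back_and_forth_py : Prop := ∀ (positions : List (Int × Int)), Dom_is_back_and_forth_py positions → Spec_is_back_and_forth_py positions (is_back_and_forth_py positions)

-- ===== LEMMAS AND PROOFS =====

-- counting reversals by index over `range (rest.length)` equals counting over adjacent pairs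
-- of the delta table `zipWith g tail self`
lemma count_range_eq_count_zip_deltas {α : Type} (g : α → α → Int) (d : α) :
    ∀ (rest : List α) (p q : α),
      (List.range rest.length).countP
          (fun k => decide ((g ((p::q::rest).getD (k+1) d) ((p::q::rest).getD k d)) *
                            (g ((p::q::rest).getD (k+2) d) ((p::q::rest).getD (k+1) d)) < 0))
      = ((List.zipWith g (q::rest) (p::q::rest)).zip (List.zipWith g (q::rest) (p::q::rest)).tail).countP
          (fun ab => decide (ab.1 * ab.2 < 0)) := by
  intro rest
  induction rest with
  | nil => intro p q; simp
  | cons r rest ih =>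
    intro p q
    rw [List.length_cons, List.range_succ_eq_map, List.countP_cons, List.countP_map]
    have hmap : ((fun k => decide ((g ((p::q::r::rest).getD (k+1) d) ((p::q::r::rest).getD k d)) *
                            (g ((p::q::r::rest).getD (k+2) d) ((p::q::r::rest).getD (k+1) d)) < 0)) ∘ Nat.succ)
        = (fun k => decide ((g ((q::r::rest).getD (k+1) d) ((q::r::rest).getD k d)) *
                            (g ((q::r::rest).getD (k+2) d) ((q::r::rest).getD (k+1) d)) < 0)) := by
      funext k
      simp
    rw [hmap, ih q r]
    simp [List.zip, List.countP_cons]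

-- a pyRange-indexed reversal count equals the adjacent-delta-pair count on a list of length ≥ 2
lemma count_pyRange_eq {α : Type} (g : α → α → Int) (d : α) (p q : α) (rest : List α) :
    (PySem.List.pyRange 2 ((p::q::rest).length : Int) 1).countP
        (fun i => decide ((g (PySem.List.pyGetD (p::q::rest) (i-1) d) (PySem.List.pyGetD (p::q::rest) (i-2) d)) *
                          (g (PySem.List.pyGetD (p::q::rest) i d) (PySem.List.pyGetD (p::q::rest) (i-1) d)) < 0))
    = ((List.zipWith g (q::rest) (p::q::rest)).zip (List.zipWith g (q::rest) (p::q::rest)).tail).countP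
        (fun ab => decide (ab.1 * ab.2 < 0)) := by
  rw [PySem.List.pyRange_one, List.countP_map]
  rw [← count_range_eq_count_zip_deltas g d rest p q]
  have hlen : (((p::q::rest).length : Int) - 2).toNat = rest.length := by
    simp only [List.length_cons]; push_cast; omega
  rw [hlen]
  apply List.countP_congr
  intro k _
  have h3 : (2 : Int) + (k : Int) = ((k+2 : Nat) : Int) := by push_cast; ring
  have h1 : ((k+2 : Nat) : Int) - 1 = ((k+1 : Nat) : Int) := by push_cast; ring
  have h2 : ((k+2 : Nat) : Int) - 2 = ((k : Nat) : Int) := by push_cast; ring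
  simp only [Function.comp_apply, h3, h1, h2, PySem.List.pyGetD_natCast]

-- the sign of a delta
def pvSgn (d : Int) : Int := (if 0 < d then 1 else 0) - (if d < 0 then 1 else 0)

-- recursive characterisation of B's run-length compression ('keep where it differs from predecessor')
def pvCrec : Int → List Int → List Int
  | _, [] => []
  | a, x :: xs => if x = a then pvCrec x xs else x :: pvCrec x xs

lemma filter_zip_eq_crec :
    ∀ (l : List Int) (a : Int),
      ((l.zip ((some a) :: l.map some)).filter (fun sp => !(sp.2 == some sp.1))).map Prod.fst
        = pvCrec a l := by
  intro l
  induction l with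
  | nil => intro a; rfl
  | cons x xs ih =>
    intro a
    by_cases h : x = a
    · subst h
      have hc : pvCrec x (x :: xs) = pvCrec x xs := by simp [pvCrec]
      rw [hc, ← ih x]
      simp [List.zip_cons_cons]
    · have hc : pvCrec a (x :: xs) = x :: pvCrec x xs := by simp [pvCrec, h]
      rw [hc, ← ih x]
      simp [List.zip_cons_cons, Ne.symm h]

lemma pairs_count_crec (P : Int × Int → Bool) (hP : ∀ a, P (a, a) = false) :
    ∀ (xs : List Int) (a : Int),
      ((a :: pvCrec a xs).zip (pvCrec a xs)).countP P
        = ((a :: xs).zip xs).countP P := by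
  intro xs
  induction xs with
  | nil => intro a; rfl
  | cons x xs ih =>
    intro a
    by_cases h : x = a
    · subst h
      have hc : pvCrec x (x :: xs) = pvCrec x xs := by simp [pvCrec]
      rw [hc, ih x]
      simp [hP x]
    · have hc : pvCrec a (x :: xs) = x :: pvCrec x xs := by simp [pvCrec, h]
      rw [hc]
      simp only [List.zip_cons_cons, List.countP_cons]
      rw [ih x]

-- the B-side pair test on signs is the A-side product test on deltas
lemma sign_pair_iff (a b : Int) :
    (pvSgn a = -(pvSgn b) ∧ pvSgn b ≠ 0) ↔ a * b < 0 := by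
  rcases lt_trichotomy a 0 with h | h | h <;>
    rcases lt_trichotomy b 0 with h' | h' | h' <;>
      simp [pvSgn, h, h', lt_asymm, mul_neg_iff]

-- map the sign function through the adjacent-pairs count
lemma pairs_count_map_sgn (l : List Int) :
    (((l.map pvSgn).zip (l.map pvSgn).tail).countP (fun uv => decide (uv.1 = -uv.2 ∧ uv.2 ≠ 0)))
      = ((l.zip l.tail).countP (fun ab => decide (ab.1 * ab.2 < 0))) := by
  rw [← List.map_tail, List.zip_map]
  rw [List.countP_map]
  apply List.countP_congr
  intro ab _
  cases ab with
  | mk a b =>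
    simpa using sign_pair_iff a b

-- B's signs list is the delta list mapped through pvSgn
lemma signs_eq_map_sgn (coords : List Int) :
    List.zipWith pvSignStep coords coords.tail
      = (List.zipWith (fun c pp => c - pp) coords.tail coords).map pvSgn := by
  rw [List.map_zipWith, List.zipWith_comm]
  have hf : (fun (b a : Int) => pvSignStep a b) = (fun (c pp : Int) => pvSgn (c - pp)) := by
    funext b a
    simp only [pvSignStep, pvSgn, gt_iff_lt]
    have e1 : (a < b) = ((0:Int) < b - a) := propext (by omega)
    have e2 : (b < a) = (b - a < (0:Int)) := propext (by omega)
    simp only [e1, e2]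
  rw [hf]

-- per-axis: B's symbolize-compress-count equals the adjacent-delta-pair product count
lemma axis_reversals_eq (g : (Int × Int) → Int) (p q : Int × Int) (rest : List (Int × Int)) :
    pvAxisReversals ((p::q::rest).map g)
      = (((List.zipWith (fun c pp => g c - g pp) (q::rest) (p::q::rest)).zip
          (List.zipWith (fun c pp => g c - g pp) (q::rest) (p::q::rest)).tail).countP
            (fun ab => decide (ab.1 * ab.2 < 0)) : Int) := by
  unfold pvAxisReversals
  have hD : List.zipWith (fun c pp => c - pp) ((p::q::rest).map g).tail ((p::q::rest).map g)
      = List.zipWith (fun c pp => g c - g pp) (q::rest) (p::q::rest) := by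
    rw [show ((p::q::rest).map g).tail = (q::rest).map g from rfl, List.zipWith_map]
  have hs : List.zipWith pvSignStep ((p::q::rest).map g) ((p::q::rest).map g).tail
      = (List.zipWith (fun c pp => g c - g pp) (q::rest) (p::q::rest)).map pvSgn := by
    rw [signs_eq_map_sgn, hD]
  rw [hs]
  set D := List.zipWith (fun c pp => g c - g pp) (q::rest) (p::q::rest) with hDdef
  have hDne : D ≠ [] := by simp [hDdef]
  rcases hDm : D.map pvSgn with _ | ⟨s, ss⟩
  · simp at hDm; simp [hDm] at hDne
  · have hruns : pvRuns (s :: ss) = s :: pvCrec s ss := by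
      unfold pvRuns
      simp only [List.map_cons, List.zip_cons_cons, List.filter_cons]
      rw [if_pos (by simp)]
      simp only [List.map_cons]
      rw [filter_zip_eq_crec ss s]
    unfold pvBoundaryCount
    rw [hruns]
    have hcrec := pairs_count_crec (fun uv => decide (uv.1 = -uv.2 ∧ uv.2 ≠ 0))
      (by intro a; simp; omega) ss s
    have hpairs := pairs_count_map_sgn D
    rw [hDm] at hpairs
    simp only [List.tail_cons]
    simp only [List.tail_cons] at hpairs
    rw [hcrec, hpairs]

-- ===== VERDICT (by name: the statement is the Claim_ definition above) =====
theorem is_back_and_forth_py_spec : Claim_equal_is_back_and_forth_py := by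
  intro positions _
  unfold Spec_is_back_and_forth_py is_back_and_forth_py is_back_and_forth_py_alt
  by_cases h : positions.length < 10
  · simp [h]
  · rcases positions with _ | ⟨p, _ | ⟨q, rest⟩⟩
    · simp at h
    · simp at h
    · simp only [if_neg h]
      rw [PySem.List.foldl_prod_mk
            (f := fun (a : Int) i =>
              if ((PySem.List.pyGetD (p::q::rest) (i-1) (0,0)).1 - (PySem.List.pyGetD (p::q::rest) (i-2) (0,0)).1) *
                 ((PySem.List.pyGetD (p::q::rest) i (0,0)).1 - (PySem.List.pyGetD (p::q::rest) (i-1) (0,0)).1) < 0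
              then a + 1 else a)
            (g := fun (a : Int) i =>
              if ((PySem.List.pyGetD (p::q::rest) (i-1) (0,0)).2 - (PySem.List.pyGetD (p::q::rest) (i-2) (0,0)).2) *
                 ((PySem.List.pyGetD (p::q::rest) i (0,0)).2 - (PySem.List.pyGetD (p::q::rest) (i-1) (0,0)).2) < 0
              then a + 1 else a)]
      rw [PySem.List.foldl_ite_add_one, PySem.List.foldl_ite_add_one]
      rw [count_pyRange_eq (fun c p => c.1 - p.1) ((0:Int),(0:Int)) p q rest,
          count_pyRange_eq (fun c p => c.2 - p.2) ((0:Int),(0:Int)) p q rest]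
      rw [axis_reversals_eq Prod.fst p q rest, axis_reversals_eq Prod.snd p q rest]
      simp
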